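-- pv_equiv track=rewrite | github.com/davidfandre2309/assigment-6 | bitwise_operations.py | bitwise_operations
-- ===== SOURCE A (Python) =====
-- def bitwise_operations(numbers):
--
--
--     bitwise_and = numbers[0]
--     bitwise_or = numbers[0]
--     bitwise_xor = numbers[0]
--
--     for num in numbers[1:]:
--         bitwise_and &= num
--         bitwise_or |= num
--         bitwise_xor ^= num
--
--     return bitwise_and, bitwise_or, bitwise_xor
-- ===== SOURCE B (Python) =====
-- def _reduce(op, seed, xs):
--     for x in xs:
--         seed = op(seed, x)
--     return seed
--
--
-- def bitwise_operations(numbers):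
--     head, tail = numbers[0], numbers[1:]
--     return (_reduce(lambda a, b: a & b, head, tail),
--             _reduce(lambda a, b: a | b, head, tail),
--             _reduce(lambda a, b: a ^ b, head, tail))
-- ===== Notes on version B (the rewrite author's own statement) =====
-- stated objective: idiomatic
-- what changed: Replaces the single fused three-accumulator loop with three independent reduce passes (one per bitwise operation) over the tail seeded by the first element.
import Mathlib
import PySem

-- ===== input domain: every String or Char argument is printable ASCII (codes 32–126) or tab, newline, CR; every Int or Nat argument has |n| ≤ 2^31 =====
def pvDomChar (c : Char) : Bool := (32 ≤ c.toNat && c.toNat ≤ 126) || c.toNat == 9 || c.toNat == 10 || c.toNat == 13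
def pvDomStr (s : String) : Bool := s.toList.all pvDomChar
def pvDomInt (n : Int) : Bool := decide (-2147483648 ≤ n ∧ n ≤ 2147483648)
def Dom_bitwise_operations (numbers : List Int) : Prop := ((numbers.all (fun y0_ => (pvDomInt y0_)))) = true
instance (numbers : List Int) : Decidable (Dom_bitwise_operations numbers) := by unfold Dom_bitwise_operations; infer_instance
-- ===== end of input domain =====

-- B replaces A's single fused three-accumulator loop with three independent reductions over the tail (idiomatic decomposition; same cost).


-- ===== PORT A =====
-- A: reads numbers[0] (IndexError on []; excluded by Pre_), then one fused loop over
-- numbers[1:] updating the three accumulators together.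
def bitwise_operations (numbers : List Int) : Int × Int × Int :=
  match numbers with
  | [] => (0, 0, 0)  -- unreachable under Pre_: Python raises IndexError on numbers[0]
  | h :: t =>
      t.foldl (fun (s : Int × Int × Int) num => (Int.land s.1 num, Int.lor s.2.1 num, Int.xor s.2.2 num)) (h, h, h)

-- ===== PORT B =====
-- B's generic _reduce helper
def pvReduce (op : Int → Int → Int) (seed : Int) (xs : List Int) : Int :=
  xs.foldl op seed

-- B: three independent reductions, each seeded by numbers[0] over numbers[1:]
def bitwise_operations_alt (numbers : List Int) : Int × Int × Int :=
  match numbers with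
  | [] => (0, 0, 0)  -- unreachable under Pre_: numbers[0] raises IndexError
  | h :: t =>
      (pvReduce Int.land h t,
       pvReduce Int.lor h t,
       pvReduce Int.xor h t)

-- ===== PRECONDITION & SPEC =====
-- Pre_: both Pythons raise IndexError on the empty list (numbers[0]).
def Pre_bitwise_operations (numbers : List Int) : Prop := numbers ≠ []
instance (numbers : List Int) : Decidable (Pre_bitwise_operations numbers) := by
  unfold Pre_bitwise_operations; infer_instance
def pvWitness_bitwise_operations : List Int := [5, 3, 12]

def Spec_bitwise_operations (numbers : List Int) (out : Int × Int × Int) : Prop := out = bitwise_operations_alt numbers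
instance (numbers : List Int) (out : Int × Int × Int) : Decidable (Spec_bitwise_operations numbers out) := by unfold Spec_bitwise_operations; infer_instance

-- ===== CLAIM (what is proved, stated in full; the proofs are below) =====
def Claim_equal_bitwise_operations : Prop := ∀ (numbers : List Int), Dom_bitwise_operations numbers → Pre_bitwise_operations numbers → Spec_bitwise_operations numbers (bitwise_operations numbers)

-- ===== LEMMAS AND PROOFS =====
theorem fused_eq_split (t : List Int) : ∀ (a b c : Int),
    t.foldl (fun (s : Int × Int × Int) num => (Int.land s.1 num, Int.lor s.2.1 num, Int.xor s.2.2 num)) (a, b, c)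
      = (t.foldl Int.land a, t.foldl Int.lor b, t.foldl Int.xor c) := by
  induction t with
  | nil => intro a b c; rfl
  | cons x xs ih => intro a b c; simpa [List.foldl] using ih (a.land x) (b.lor x) (c.xor x)

-- ===== VERDICT (by name: the statement is the Claim_ definition above) =====
theorem bitwise_operations_spec : Claim_equal_bitwise_operations := by
  intro numbers _ hpre
  unfold Spec_bitwise_operations bitwise_operations bitwise_operations_alt pvReduce
  cases numbers with
  | nil => exact absurd rfl hpre
  | cons h t => exact fused_eq_split t h h h
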